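-- pv_equiv track=rewrite | github.com/CiscoSE/cisco-sample-code | formatter/format.py | prefix_and_indent
-- ===== SOURCE A (Python) =====
-- def prefix_and_indent(prefix: str, text: str) -> str:
--     """Add the prefix to the first line and indent all subsequent lines."""
--     prefix_len = len(prefix)
--     output = []
--     for line_number, line in enumerate(text.split('\n')):
--         if line_number == 0:
--             output.append(prefix + line)
--         else:
--             output.append(" " * prefix_len + line)
--
--     return '\n'.join(output)
-- ===== SOURCE B (Python) =====
-- def prefix_and_indent(prefix: str, text: str) -> str:
--     """Add the prefix to the first line and indent all subsequent lines."""
--     return prefix + text.replace('\n', '\n' + ' ' * len(prefix))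
-- ===== Notes on version B (the rewrite author's own statement) =====
-- stated objective: simpler
-- what changed: Replaced the split/enumerate/append/join loop with a single expression: substitute every newline by newline-plus-indent via str.replace and prepend the prefix once.
import Mathlib
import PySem

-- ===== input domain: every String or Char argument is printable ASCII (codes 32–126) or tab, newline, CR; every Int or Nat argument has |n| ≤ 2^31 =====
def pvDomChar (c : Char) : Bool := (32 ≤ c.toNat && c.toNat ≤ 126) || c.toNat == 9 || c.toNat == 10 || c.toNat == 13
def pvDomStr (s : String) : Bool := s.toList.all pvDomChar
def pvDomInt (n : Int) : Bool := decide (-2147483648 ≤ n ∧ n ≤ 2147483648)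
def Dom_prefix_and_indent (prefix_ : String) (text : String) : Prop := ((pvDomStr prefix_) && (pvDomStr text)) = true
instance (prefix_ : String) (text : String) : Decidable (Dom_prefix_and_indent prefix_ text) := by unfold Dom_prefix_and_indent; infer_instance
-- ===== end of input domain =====

-- B replaces A's split/enumerate/append/join loop with one expression:
-- prefix ++ text.replace("\n", "\n" + " "*len(prefix)); objective: simpler.


-- ===== PORT A =====
-- text.split('\n'): sep "\n" is non-empty, so PySem.Str.split? always returns some; .getD [] only peels the some.
def prefix_and_indent (prefix_ : String) (text : String) : String :=
  let prefixLen : Int := PySem.Str.len prefix_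
  let output : List String :=
    (PySem.List.enumerate ((PySem.Str.split? text "\n").getD [])).foldl
      (fun output p =>
        if p.1 == 0 then output ++ [prefix_ ++ p.2]
        else output ++ [String.mk (PySem.List.pyRepeat [' '] prefixLen) ++ p.2]) []
  PySem.Str.join "\n" output

-- ===== PORT B =====
def prefix_and_indent_alt (prefix_ : String) (text : String) : String :=
  prefix_ ++ PySem.Str.replace text "\n"
    ("\n" ++ String.mk (PySem.List.pyRepeat [' '] (PySem.Str.len prefix_)))

-- ===== PRECONDITION & SPEC =====
def Spec_prefix_and_indent (prefix_ : String) (text : String) (out : String) : Prop := out = prefix_and_indent_alt prefix_ text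
instance (prefix_ : String) (text : String) (out : String) : Decidable (Spec_prefix_and_indent prefix_ text out) := by unfold Spec_prefix_and_indent; infer_instance

-- ===== CLAIM (what is proved, stated in full; the proofs are below) =====
def Claim_equal_prefix_and_indent : Prop := ∀ (prefix_ : String) (text : String), Dom_prefix_and_indent prefix_ text → Spec_prefix_and_indent prefix_ text (prefix_and_indent prefix_ text)

-- ===== LEMMAS AND PROOFS =====

/-- First line and remaining lines of a newline-split, structurally. -/
def splitNL : List Char → List Char × List (List Char)
  | [] => ([], [])
  | c :: t =>
    let p := splitNL t
    if c = '\n' then ([], p.1 :: p.2) else (c :: p.1, p.2)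

/-- Replace each '\n' by `ins`, structurally. -/
def repNL (ins : List Char) : List Char → List Char
  | [] => []
  | c :: t => if c = '\n' then ins ++ repNL ins t else c :: repNL ins t

theorem splitOn_go_nl (fuel : Nat) : ∀ (l cur : List Char) (accs : List (List Char)),
    l.length ≤ fuel →
    PySem.Chars.splitOn.go ['\n'] fuel l cur accs =
      accs.reverse ++ (cur.reverse ++ (splitNL l).1) :: (splitNL l).2 := by
  induction fuel with
  | zero =>
    intro l cur accs h
    have : l = [] := by cases l <;> simp_all
    subst this
    simp [PySem.Chars.splitOn.go, splitNL]
  | succ n ih =>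
    intro l cur accs h
    cases l with
    | nil => simp [PySem.Chars.splitOn.go, splitNL]
    | cons c rest =>
      by_cases hc : c = '\n'
      · subst hc
        rw [PySem.Chars.splitOn.go]
        rw [if_pos (by simp [List.isPrefixOf])]
        rw [show List.drop (['\n'].length) ('\n' :: rest) = rest from rfl]
        rw [ih rest [] (cur.reverse :: accs) (by simpa using Nat.le_of_succ_le_succ (by simpa using h))]
        simp [splitNL]
      · rw [PySem.Chars.splitOn.go]
        rw [if_neg (by simp [List.isPrefixOf]; exact fun hh => hc hh.symm)]
        rw [ih rest (c :: cur) accs (by simpa using Nat.le_of_succ_le_succ (by simpa using h))]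
        simp [splitNL, hc]

theorem splitOn_nl (s : List Char) :
    PySem.Chars.splitOn s ['\n'] = (splitNL s).1 :: (splitNL s).2 := by
  unfold PySem.Chars.splitOn
  rw [splitOn_go_nl (s.length + 1) s [] [] (by omega)]
  simp

theorem replace_go_nl (new : List Char) (fuel : Nat) : ∀ (l acc : List Char),
    l.length ≤ fuel →
    PySem.Chars.replace.go ['\n'] new fuel l acc = acc.reverse ++ repNL new l := by
  induction fuel with
  | zero =>
    intro l acc h
    have : l = [] := by cases l <;> simp_all
    subst this
    simp [PySem.Chars.replace.go, repNL]
  | succ n ih =>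
    intro l acc h
    cases l with
    | nil => simp [PySem.Chars.replace.go, repNL]
    | cons c rest =>
      by_cases hc : c = '\n'
      · subst hc
        rw [PySem.Chars.replace.go]
        rw [if_pos (by simp [List.isPrefixOf])]
        rw [show List.drop (['\n'].length) ('\n' :: rest) = rest from rfl]
        rw [ih rest (new.reverse ++ acc) (by simpa using Nat.le_of_succ_le_succ (by simpa using h))]
        simp [repNL]
      · rw [PySem.Chars.replace.go]
        rw [if_neg (by simp [List.isPrefixOf]; exact fun hh => hc hh.symm)]
        rw [ih rest (c :: acc) (by simpa using Nat.le_of_succ_le_succ (by simpa using h))]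
        simp [repNL, hc]

theorem replace_nl (s new : List Char) :
    PySem.Chars.replace s ['\n'] new = repNL new s := by
  unfold PySem.Chars.replace
  rw [if_neg (by simp)]
  rw [replace_go_nl new s.length s [] (le_refl _)]
  simp

/-- A's loop over the tail of the enumeration (all indices ≥ 1) just indents every line. -/
theorem foldl_enum_tail (pre spaces : String) (xs : List String) :
    ∀ (i : Int) (acc : List String), 1 ≤ i →
    (PySem.List.enumerate xs i).foldl
      (fun output p =>
        if p.1 == 0 then output ++ [pre ++ p.2] else output ++ [spaces ++ p.2]) acc
    = acc ++ xs.map (fun line => spaces ++ line) := by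
  induction xs with
  | nil => intro i acc _; simp [PySem.List.enumerate]
  | cons x t ih =>
    intro i acc hi
    rw [PySem.List.enumerate_cons]
    simp only [List.foldl_cons]
    rw [if_neg (by simp; omega)]
    rw [ih (i + 1) _ (by omega)]
    simp

/-- Joining the prefixed first line with the indented rest equals prefix ++ newline-replacement. -/
theorem join_splitNL (sp : List Char) (s : List Char) : ∀ (p : List Char),
    PySem.Chars.join ['\n'] ((p ++ (splitNL s).1) :: ((splitNL s).2).map (fun x => sp ++ x))
      = p ++ repNL ('\n' :: sp) s := by
  induction s with
  | nil => intro p; simp [splitNL, repNL, PySem.Chars.join_singleton]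
  | cons c t ih =>
    intro p
    by_cases hc : c = '\n'
    · subst hc
      rw [show splitNL ('\n' :: t) = ([], (splitNL t).1 :: (splitNL t).2) by simp [splitNL]]
      rw [show repNL ('\n' :: sp) ('\n' :: t) = ('\n' :: sp) ++ repNL ('\n' :: sp) t by simp [repNL]]
      simp only [List.map_cons]
      rw [PySem.Chars.join_cons_cons]
      rw [ih sp]
      simp
    · rw [show splitNL (c :: t) = (c :: (splitNL t).1, (splitNL t).2) by simp [splitNL, hc]]
      rw [show repNL ('\n' :: sp) (c :: t) = c :: repNL ('\n' :: sp) t by simp [repNL, hc]]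
      have : p ++ c :: (splitNL t).1 = (p ++ [c]) ++ (splitNL t).1 := by simp
      rw [this, ih (p ++ [c])]
      simp

theorem prefix_and_indent_eq (prefix_ text : String) :
    prefix_and_indent prefix_ text = prefix_and_indent_alt prefix_ text := by
  apply String.toList_inj.mp
  unfold prefix_and_indent prefix_and_indent_alt
  -- name the indent string and the split parts
  set spaces : String := String.mk (PySem.List.pyRepeat [' '] (PySem.Str.len prefix_)) with hsp
  -- A's split: Str.split? text "\n" = some parts with parts.map toList = splitOn text.toList ['\n']
  have hsplit := PySem.Str.split?_map text "\n"
  rw [show ("\n" : String).toList = ['\n'] from rfl] at hsplit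
  rw [PySem.Chars.split?] at hsplit
  rw [if_neg (by simp)] at hsplit
  rw [splitOn_nl] at hsplit
  obtain ⟨parts, hps, hmap⟩ : ∃ parts, PySem.Str.split? text "\n" = some parts ∧
      parts.map String.toList = (splitNL text.toList).1 :: (splitNL text.toList).2 := by
    cases h : PySem.Str.split? text "\n" with
    | none => rw [h] at hsplit; simp at hsplit
    | some ps => exact ⟨ps, rfl, by rw [h] at hsplit; simpa using hsplit⟩
  rw [hps]
  obtain ⟨s0, rest, hparts⟩ : ∃ s0 rest, parts = s0 :: rest := by
    cases parts with
    | nil => simp at hmap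
    | cons a b => exact ⟨a, b, rfl⟩
  subst hparts
  simp only [List.map_cons, List.cons.injEq] at hmap
  obtain ⟨h0, hrest⟩ := hmap
  -- run A's loop
  simp only [Option.getD_some, PySem.List.enumerate_cons, List.foldl_cons]
  rw [if_pos (by decide)]
  simp only [List.nil_append]
  rw [show ((0 : Int) + 1) = 1 from rfl, ← hsp]
  rw [foldl_enum_tail prefix_ spaces rest 1 [prefix_ ++ s0] (le_refl _)]
  -- move to char lists
  rw [PySem.Str.toList_join]
  simp only [List.map_cons, List.map_map, List.singleton_append, String.toList_append, h0]
  have hmapmap : (List.map (String.toList ∘ fun line => spaces ++ line) rest)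
      = ((splitNL text.toList).2).map (fun x => spaces.toList ++ x) := by
    rw [← hrest, List.map_map]
    simp [Function.comp_def]
  rw [hmapmap]
  rw [show ("\n" : String).toList = ['\n'] from rfl]
  rw [join_splitNL spaces.toList text.toList prefix_.toList]
  -- B side
  rw [PySem.Str.toList_replace]
  rw [show ("\n" : String).toList = ['\n'] from rfl]
  rw [String.toList_append, show ("\n" : String).toList = ['\n'] from rfl]
  rw [replace_nl]
  rfl

-- ===== VERDICT (by name: the statement is the Claim_ definition above) =====
theorem prefix_and_indent_spec : Claim_equal_prefix_and_indent := by
  intro prefix_ text _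
  unfold Spec_prefix_and_indent
  exact prefix_and_indent_eq prefix_ text
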